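-- pv_equiv track=rewrite | github.com/ishan-nerlekar/Connect-4-GameTree-Player | Connect 4 GameTree Player/GameTree Player.py | diagonalCheck
-- ===== SOURCE A (Python) =====
-- def diagonalCheck(row, column, state, streak):
--     total = 0
--     count = 0
--     j = column
--     for i in range(row, 6):
--         if j > 6:
--             break
--         elif state[i][j] == state[row][column]:
--             count += 1
--         else:
--             break
--         j += 1
--     if count >= streak:
--         total += 1
--     count = 0
--     j = column
--     for i in range(row, -1, -1):
--         if j > 6:
--             break
--         elif state[i][j] == state[row][column]:
--             count += 1
--         else:
--             break
--         j += 1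
--     if count >= streak:
--         total += 1
--     return total
-- ===== SOURCE B (Python) =====
-- def diagonalCheck(row, column, state, streak):
--     total = 0
--     for di in (1, -1):
--         steps = min(6 - row if di == 1 else row + 1, 7 - column)
--         cells = [state[row + k * di][column + k] for k in range(steps)]
--         bad = [k for k, v in enumerate(cells) if v != state[row][column]]
--         n = bad[0] if bad else len(cells)
--         if n >= streak:
--             total += 1
--     return total
-- ===== Notes on version B (the rewrite author's own statement) =====
-- stated objective: simpler
-- what changed: A's two near-duplicate sentinel-walking loops are replaced by one loop over the two directions that extracts the diagonal segment with a closed-form step count and a slice comprehension, then takes the run length as the index of the first mismatching cell.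
-- outside the precondition, e.g. on diagonalCheck(0, 0, [[1], [5, 2]], 1): A returns 2, B raises IndexError
import Mathlib
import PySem

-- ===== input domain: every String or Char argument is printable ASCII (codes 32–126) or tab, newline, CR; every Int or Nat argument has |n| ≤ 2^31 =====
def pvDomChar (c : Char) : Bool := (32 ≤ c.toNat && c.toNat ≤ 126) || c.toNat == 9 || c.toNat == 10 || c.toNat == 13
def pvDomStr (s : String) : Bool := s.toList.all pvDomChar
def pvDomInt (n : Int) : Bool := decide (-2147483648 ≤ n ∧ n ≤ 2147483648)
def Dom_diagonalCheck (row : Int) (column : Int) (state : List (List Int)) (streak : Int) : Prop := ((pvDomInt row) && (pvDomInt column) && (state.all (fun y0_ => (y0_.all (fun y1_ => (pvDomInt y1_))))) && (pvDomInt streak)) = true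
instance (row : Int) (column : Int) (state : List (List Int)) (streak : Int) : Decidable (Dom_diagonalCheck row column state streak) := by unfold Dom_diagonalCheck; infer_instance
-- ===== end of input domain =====

-- B replaces A's two duplicated sentinel-walking loops by closed-form diagonal-segment
-- extraction plus first-mismatch index (objective: simpler).

-- state[i][j]; exact where Python indexing succeeds (Pre_ guarantees that), default 0 outside
def pvCell (state : List (List Int)) (i j : Int) : Int :=
  PySem.List.pyGetD (PySem.List.pyGetD state i []) j 0

-- ===== PORT A =====
-- the body of each of A's two for-loops; the fuel is the length of the loop's range,
-- i the current range element (stepping by di), carrying j and count as in A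
def pvLoopA (state : List (List Int)) (row column di : Int) : Nat → Int → Int → Int → Int
  | 0, _, _, count => count
  | Nat.succ n, i, j, count =>
    if j > 6 then count
    else if pvCell state i j = pvCell state row column then
      pvLoopA state row column di n (i + di) (j + 1) (count + 1)
    else count

def diagonalCheck (row : Int) (column : Int) (state : List (List Int)) (streak : Int) : Int :=
  let count1 := pvLoopA state row column 1 (6 - row).toNat row column 0
  let total1 : Int := if count1 ≥ streak then 1 else 0
  let count2 := pvLoopA state row column (-1) (row + 1).toNat row column 0
  total1 + (if count2 ≥ streak then 1 else 0)

-- ===== PORT B =====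
-- cells = [state[row + k*di][column + k] for k in range(steps)]
def pvCellsB (row column : Int) (state : List (List Int)) (di : Int) : List Int :=
  let steps := min (if di = 1 then 6 - row else row + 1) (7 - column)
  (PySem.List.pyRange 0 steps 1).map (fun k => pvCell state (row + k * di) (column + k))

-- n = bad[0] if bad else len(cells)
def pvRunB (row column : Int) (state : List (List Int)) (di : Int) : Int :=
  let cells := pvCellsB row column state di
  let bad := ((PySem.List.enumerate cells 0).filter (fun p => p.2 != pvCell state row column)).map Prod.fst
  bad.head?.getD (cells.length : Int)

def diagonalCheck_alt (row : Int) (column : Int) (state : List (List Int)) (streak : Int) : Int :=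
  [(1 : Int), -1].foldl
    (fun total di => if pvRunB row column state di ≥ streak then total + 1 else total) 0

-- ===== PRECONDITION & SPEC =====
-- Pre_ excludes inputs with column ≤ 6 that are off the standard 6×7 board or whose board is
-- not 6×7: there Python A raises IndexError or, via negative-index wraparound / a lucky early
-- mismatch on a ragged board, returns an accidental value (column > 6 is kept: no cell is ever
-- indexed there and A returns normally on every state).
def Pre_diagonalCheck (row : Int) (column : Int) (state : List (List Int)) (streak : Int) : Prop :=
  6 < column ∨
    (0 ≤ row ∧ row < 6 ∧ 0 ≤ column ∧ column ≤ 6 ∧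
      state.length = 6 ∧ ∀ r ∈ state, r.length = 7)
instance (row : Int) (column : Int) (state : List (List Int)) (streak : Int) : Decidable (Pre_diagonalCheck row column state streak) := by unfold Pre_diagonalCheck; infer_instance

def pvWitness_diagonalCheck : Int × Int × List (List Int) × Int :=
  (2, 3, [[0,0,0,0,0,0,0],[0,0,0,0,0,0,0],[0,0,0,0,0,0,0],
          [0,0,0,0,0,0,0],[0,0,0,0,0,0,0],[0,0,0,0,0,0,0]], 4)

def Spec_diagonalCheck (row : Int) (column : Int) (state : List (List Int)) (streak : Int) (out : Int) : Prop := out = diagonalCheck_alt row column state streak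
instance (row : Int) (column : Int) (state : List (List Int)) (streak : Int) (out : Int) : Decidable (Spec_diagonalCheck row column state streak out) := by unfold Spec_diagonalCheck; infer_instance

-- ===== CLAIM (what is proved, stated in full; the proofs are below) =====
def Claim_equal_diagonalCheck : Prop := ∀ (row : Int) (column : Int) (state : List (List Int)) (streak : Int), Dom_diagonalCheck row column state streak → Pre_diagonalCheck row column state streak → Spec_diagonalCheck row column state streak (diagonalCheck row column state streak)

-- ===== LEMMAS AND PROOFS =====

-- run length of the matching prefix (the common value both ports compute per direction)
def pvRunLen (target : Int) (cells : List Int) : Int :=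
  ((cells.takeWhile (fun v => v == target)).length : Int)

theorem pvFirstBad_eq (target : Int) : ∀ (cells : List Int) (s : Int),
    (((PySem.List.enumerate cells s).filter (fun p => p.2 != target)).map Prod.fst).head?
      = if (cells.takeWhile (fun v => v == target)).length = cells.length then none
        else some (s + ((cells.takeWhile (fun v => v == target)).length : Int)) := by
  intro cells
  induction cells with
  | nil => intro s; simp [PySem.List.enumerate_nil]
  | cons v rest ih =>
    intro s
    rw [PySem.List.enumerate_cons]
    by_cases hv : v = target
    · have hfil : List.filter (fun p => p.2 != target)
            ((s, v) :: PySem.List.enumerate rest (s + 1))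
          = List.filter (fun p => p.2 != target) (PySem.List.enumerate rest (s + 1)) := by
        simp [hv]
      have ht : List.takeWhile (fun v => v == target) (v :: rest)
          = v :: List.takeWhile (fun v => v == target) rest := by
        simp [hv]
      rw [hfil, ih (s + 1), ht]
      by_cases hlen : (rest.takeWhile (fun v => v == target)).length = rest.length
      · simp [hlen]
      · have hlen' : ¬ ((rest.takeWhile (fun v => v == target)).length + 1
            = rest.length + 1) := by omega
        simp only [List.length_cons, hlen, hlen', if_false]
        congr 1
        push_cast
        ring
    · have hfil : List.filter (fun p => p.2 != target)
            ((s, v) :: PySem.List.enumerate rest (s + 1))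
          = (s, v) :: List.filter (fun p => p.2 != target)
              (PySem.List.enumerate rest (s + 1)) := by
        simp [bne_iff_ne, hv]
      have ht : List.takeWhile (fun v => v == target) (v :: rest) = [] := by
        simp [hv]
      rw [hfil, ht]
      simp

theorem pvRunB_eq (row column : Int) (state : List (List Int)) (di : Int) :
    pvRunB row column state di
      = pvRunLen (pvCell state row column) (pvCellsB row column state di) := by
  show (((PySem.List.enumerate (pvCellsB row column state di) 0).filter
        (fun p => p.2 != pvCell state row column)).map Prod.fst).head?.getD
          ((pvCellsB row column state di).length : Int)
      = pvRunLen (pvCell state row column) (pvCellsB row column state di)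
  rw [pvFirstBad_eq (pvCell state row column) (pvCellsB row column state di) 0, pvRunLen]
  by_cases hlen : ((pvCellsB row column state di).takeWhile
      (fun v => v == pvCell state row column)).length = (pvCellsB row column state di).length
  · rw [if_pos hlen]
    simp [hlen]
  · rw [if_neg hlen]
    simp

-- A's upward loop computes the run length along (row+k, column+k)
theorem pvLoopA_up (state : List (List Int)) (row column : Int) :
    ∀ (n : Nat) (r j count : Int), ((6 : Int) - r).toNat = n →
    pvLoopA state row column 1 n r j count
      = count + pvRunLen (pvCell state row column)
          ((PySem.List.pyRange 0 (min (6 - r) (7 - j)) 1).map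
            (fun k => pvCell state (r + k) (j + k))) := by
  intro n
  induction n with
  | zero =>
    intro r j count hn
    rw [PySem.List.pyRange_one_eq_nil (by omega : min (6 - r) (7 - j) ≤ 0)]
    simp [pvLoopA, pvRunLen]
  | succ n ih =>
    intro r j count hn
    by_cases hj : j > 6
    · rw [PySem.List.pyRange_one_eq_nil (by omega : min (6 - r) (7 - j) ≤ 0)]
      simp [pvLoopA, hj, pvRunLen]
    · have hm : (0 : Int) < min (6 - r) (7 - j) := by omega
      rw [PySem.List.pyRange_one_cons hm]
      simp only [pvLoopA, hj, if_false, List.map_cons, zero_add, add_zero]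
      by_cases hcell : pvCell state r j = pvCell state row column
      · rw [if_pos hcell, ih (r + 1) (j + 1) (count + 1) (by omega)]
        have htail : (PySem.List.pyRange 1 (min (6 - r) (7 - j)) 1).map
              (fun k => pvCell state (r + k) (j + k))
            = (PySem.List.pyRange 0 (min (6 - (r + 1)) (7 - (j + 1))) 1).map
              (fun k => pvCell state (r + 1 + k) (j + 1 + k)) := by
          rw [PySem.List.pyRange_one, PySem.List.pyRange_one]
          have hlen : (min (6 - r) (7 - j) - 1).toNat
              = (min (6 - (r + 1)) (7 - (j + 1)) - 0).toNat := by omega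
          rw [List.map_map, List.map_map, hlen]
          apply List.map_congr_left
          intro k _
          simp only [Function.comp]
          have h1 : r + (1 + (k : Int)) = r + 1 + (0 + (k : Int)) := by ring
          have h2 : j + (1 + (k : Int)) = j + 1 + (0 + (k : Int)) := by ring
          rw [h1, h2]
        rw [htail]
        unfold pvRunLen
        rw [List.takeWhile_cons, if_pos (by simp [hcell])]
        simp only [List.length_cons]
        push_cast
        ring
      · rw [if_neg hcell]
        unfold pvRunLen
        rw [List.takeWhile_cons, if_neg (by simp [hcell])]
        simp

-- A's downward loop computes the run length along (row-k, column+k)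
theorem pvLoopA_down (state : List (List Int)) (row column : Int) :
    ∀ (n : Nat) (r j count : Int), (r + 1).toNat = n →
    pvLoopA state row column (-1) n r j count
      = count + pvRunLen (pvCell state row column)
          ((PySem.List.pyRange 0 (min (r + 1) (7 - j)) 1).map
            (fun k => pvCell state (r - k) (j + k))) := by
  intro n
  induction n with
  | zero =>
    intro r j count hn
    rw [PySem.List.pyRange_one_eq_nil (by omega : min (r + 1) (7 - j) ≤ 0)]
    simp [pvLoopA, pvRunLen]
  | succ n ih =>
    intro r j count hn
    by_cases hj : j > 6
    · rw [PySem.List.pyRange_one_eq_nil (by omega : min (r + 1) (7 - j) ≤ 0)]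
      simp [pvLoopA, hj, pvRunLen]
    · have hm : (0 : Int) < min (r + 1) (7 - j) := by omega
      rw [PySem.List.pyRange_one_cons hm]
      simp only [pvLoopA, hj, if_false, List.map_cons, zero_add, add_zero, sub_zero]
      by_cases hcell : pvCell state r j = pvCell state row column
      · have hstep : r + (-1) = r - 1 := by ring
        rw [if_pos hcell, hstep, ih (r - 1) (j + 1) (count + 1) (by omega)]
        have htail : (PySem.List.pyRange 1 (min (r + 1) (7 - j)) 1).map
              (fun k => pvCell state (r - k) (j + k))
            = (PySem.List.pyRange 0 (min (r - 1 + 1) (7 - (j + 1))) 1).map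
              (fun k => pvCell state (r - 1 - k) (j + 1 + k)) := by
          rw [PySem.List.pyRange_one, PySem.List.pyRange_one]
          have hlen : (min (r + 1) (7 - j) - 1).toNat
              = (min (r - 1 + 1) (7 - (j + 1)) - 0).toNat := by omega
          rw [List.map_map, List.map_map, hlen]
          apply List.map_congr_left
          intro k _
          simp only [Function.comp]
          have h1 : r - (1 + (k : Int)) = r - 1 - (0 + (k : Int)) := by ring
          have h2 : j + (1 + (k : Int)) = j + 1 + (0 + (k : Int)) := by ring
          rw [h1, h2]
        rw [htail]
        unfold pvRunLen
        rw [List.takeWhile_cons, if_pos (by simp [hcell])]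
        simp only [List.length_cons]
        push_cast
        ring
      · rw [if_neg hcell]
        unfold pvRunLen
        rw [List.takeWhile_cons, if_neg (by simp [hcell])]
        simp

-- B's direction-1 cells are A's upward walk cells, direction-(-1) the downward ones
theorem pvCellsB_up (row column : Int) (state : List (List Int)) :
    pvCellsB row column state 1
      = (PySem.List.pyRange 0 (min (6 - row) (7 - column)) 1).map
          (fun k => pvCell state (row + k) (column + k)) := by
  unfold pvCellsB
  rw [if_pos rfl]
  apply List.map_congr_left
  intro k _
  rw [mul_one]

theorem pvCellsB_down (row column : Int) (state : List (List Int)) :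
    pvCellsB row column state (-1)
      = (PySem.List.pyRange 0 (min (row + 1) (7 - column)) 1).map
          (fun k => pvCell state (row - k) (column + k)) := by
  unfold pvCellsB
  rw [if_neg (by norm_num)]
  apply List.map_congr_left
  intro k _
  have : row + k * (-1) = row - k := by ring
  rw [this]

-- ===== VERDICT (by name: the statement is the Claim_ definition above) =====
theorem diagonalCheck_spec : Claim_equal_diagonalCheck := by
  intro row column state streak _ _
  unfold Spec_diagonalCheck diagonalCheck diagonalCheck_alt
  simp only [List.foldl_cons, List.foldl_nil]
  rw [pvRunB_eq, pvRunB_eq, pvCellsB_up, pvCellsB_down,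
      pvLoopA_up state row column (6 - row).toNat row column 0 rfl,
      pvLoopA_down state row column (row + 1).toNat row column 0 rfl]
  simp only [zero_add]
  split_ifs <;> omega
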